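-- pv_equiv track=rewrite | github.com/amirarfan/INF200-2019-Exercises | src/amir_arfan_ex/ex01/comp_to_loop.py | squares_by_loop
-- ===== SOURCE A (Python) =====
-- def squares_by_loop(n):
--     squares = []  # Initiate an empty list
--     for k in range(n):  # Create a for loop which iterates in range n
--         if k % 3 == 1:  # Modulus if test
--             squares.append(
--                 (k ** 2)
--             )  # If the if test is correct the 'k' is added to squares
--             # If the if test requirement is not fulfilled nothing happens
--     return squares
-- ===== SOURCE B (Python) =====
-- def squares_by_loop(n):
--     # Iterate directly over the arithmetic progression 1, 4, 7, ... < n;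
--     # no modulus test needed.
--     return [k * k for k in range(1, n, 3)]
-- ===== Notes on version B (the rewrite author's own statement) =====
-- stated objective: idiomatic
-- what changed: B iterates directly over the stepped arithmetic progression of qualifying values and squares each element, instead of filtering the full range with a modulus branch.
import Mathlib
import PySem

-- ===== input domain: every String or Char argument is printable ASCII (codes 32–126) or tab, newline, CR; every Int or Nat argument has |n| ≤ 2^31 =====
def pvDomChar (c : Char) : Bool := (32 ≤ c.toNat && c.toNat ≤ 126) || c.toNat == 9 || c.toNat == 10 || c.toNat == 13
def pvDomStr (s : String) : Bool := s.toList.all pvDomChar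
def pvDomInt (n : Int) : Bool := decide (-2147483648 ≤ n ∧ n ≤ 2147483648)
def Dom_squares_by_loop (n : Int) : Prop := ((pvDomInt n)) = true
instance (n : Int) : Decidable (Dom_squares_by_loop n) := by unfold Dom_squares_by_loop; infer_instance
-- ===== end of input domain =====

-- B iterates directly over the stepped range(1, n, 3) and squares, instead of
-- filtering range(n) with a modulus branch (idiomatic; return values identical).


-- ===== PORT A =====
def squares_by_loop (n : Int) : List Int :=
  (PySem.List.pyRange 0 n 1).foldl
    (fun squares k => if PySem.Int.mod k 3 = 1 then squares ++ [k ^ 2] else squares) []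

-- ===== PORT B =====
def squares_by_loop_alt (n : Int) : List Int :=
  (PySem.List.pyRange 1 n 3).map (fun k => k * k)

-- ===== PRECONDITION & SPEC =====
def Spec_squares_by_loop (n : Int) (out : List Int) : Prop := out = squares_by_loop_alt n
instance (n : Int) (out : List Int) : Decidable (Spec_squares_by_loop n out) := by unfold Spec_squares_by_loop; infer_instance

-- ===== CLAIM (what is proved, stated in full; the proofs are below) =====
def Claim_equal_squares_by_loop : Prop := ∀ (n : Int), Dom_squares_by_loop n → Spec_squares_by_loop n (squares_by_loop n)

-- ===== LEMMAS AND PROOFS =====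

-- B's range(1, n, 3) in closed form: count (n+1)/3 with Nat arithmetic (for n = ↑m).
lemma alt_closed (m : Nat) :
    squares_by_loop_alt (m : Int)
      = (List.range ((m + 1) / 3)).map (fun k : Nat => ((1 + 3 * (k : Int)) * (1 + 3 * (k : Int)))) := by
  unfold squares_by_loop_alt
  rw [PySem.List.pyRange_of_pos 1 (m : Int) (by norm_num), List.map_map]
  have hcount : (if (1 : Int) < (m : Int) then (((m : Int) - 1 + 3 - 1) / 3).toNat else 0)
      = (m + 1) / 3 := by
    split_ifs with h
    · have : ((m : Int) - 1 + 3 - 1) = ((m + 1 : Nat) : Int) := by push_cast; ring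
      rw [this, show (3 : Int) = ((3 : Nat) : Int) from rfl, ← Int.natCast_div, Int.toNat_natCast]
    · omega
  rw [hcount]
  simp [Function.comp]

lemma key (m : Nat) : squares_by_loop (m : Int) = squares_by_loop_alt (m : Int) := by
  induction m with
  | zero => decide
  | succ m ih =>
    have hA : squares_by_loop ((m + 1 : Nat) : Int)
        = (if PySem.Int.mod (m : Int) 3 = 1
            then squares_by_loop (m : Int) ++ [(m : Int) ^ 2]
            else squares_by_loop (m : Int)) := by
      unfold squares_by_loop
      rw [show ((m + 1 : Nat) : Int) = (m : Int) + 1 by push_cast; ring,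
          PySem.List.pyRange_one_succ_right (by positivity), List.foldl_append]
      simp only [List.foldl_cons, List.foldl_nil]
    have hmod : PySem.Int.mod (m : Int) 3 = ((m % 3 : Nat) : Int) := by
      rw [PySem.Int.mod_eq_emod_of_pos (by norm_num : (0:Int) < 3)]
      omega
    rw [hA, hmod, ih, alt_closed, alt_closed]
    by_cases h3 : m % 3 = 1
    · have hc : (m + 1 + 1) / 3 = (m + 1) / 3 + 1 := by omega
      have hv : (1 : Int) + 3 * ((m + 1) / 3 : Nat) = (m : Int) := by
        have : 3 * ((m + 1) / 3) = m - 1 := by omega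
        push_cast [this]; omega
      rw [hc, List.range_succ, List.map_append]
      simp only [List.map_cons, List.map_nil, hv, h3]
      norm_num [sq]
    · have hc : (m + 1 + 1) / 3 = (m + 1) / 3 := by omega
      rw [hc]
      have hne : ¬ ((m % 3 : Nat) : Int) = 1 := by omega
      simp only [if_neg hne]

lemma both_nil (n : Int) (hn : n ≤ 0) :
    squares_by_loop n = [] ∧ squares_by_loop_alt n = [] := by
  constructor
  · unfold squares_by_loop
    rw [PySem.List.pyRange_one_eq_nil (by omega)]
    rfl
  · unfold squares_by_loop_alt
    rw [PySem.List.pyRange_of_pos 1 n (by norm_num), if_neg (by omega)]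
    rfl

-- ===== VERDICT (by name: the statement is the Claim_ definition above) =====
theorem squares_by_loop_spec : Claim_equal_squares_by_loop := by
  intro n _
  unfold Spec_squares_by_loop
  by_cases hn : n ≤ 0
  · obtain ⟨h1, h2⟩ := both_nil n hn
    rw [h1, h2]
  · have : n = ((n.toNat : Nat) : Int) := by omega
    rw [this]
    exact key n.toNat
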